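-- pv_equiv track=rewrite | github.com/MTrajK/coding-problems | exercises/23-reverse_ascending_sublist/solutions.hide.py | reverse_ascending_sublists
-- ===== SOURCE A (Python) =====
-- def reverse_ascending_sublists(arr):
--     n = len(arr)
--     if n == 0:
--         return []
--
--     start = 0
--
--     for i in range(1, n):
--         # check if this the end of the strictly ascending sublist
--         if arr[i] < arr[i - 1]:
--             reverse_arr(arr, start, i - 1)
--             # a new sublist starts
--             start = i
--
--     reverse_arr(arr, start, n - 1)
--
--     return arr
--
-- def reverse_arr(arr, start, end):
--     while start < end:
--         # reverse the array from the start index to the end index by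
--         # swaping each element with the pair from the other part of the array
--         arr[start], arr[end] = arr[end], arr[start]
--         start += 1
--         end -= 1
--
--     return arr
-- ===== SOURCE B (Python) =====
-- def reverse_ascending_sublists(arr):
--     if not arr:
--         return []
--     out = []
--     run = [arr[0]]
--     for x in arr[1:]:
--         if x < run[-1]:
--             out.extend(reversed(run))
--             run = [x]
--         else:
--             run.append(x)
--     out.extend(reversed(run))
--     arr[:] = out
--     return arr
-- ===== Notes on version B (the rewrite author's own statement) =====
-- stated objective: simpler
-- what changed: Replaces index bookkeeping with in-place segment reversal by a single pass that buffers the current non-descending run and flushes it reversed into a new output list, written back with arr[:] = out.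
import Mathlib
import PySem

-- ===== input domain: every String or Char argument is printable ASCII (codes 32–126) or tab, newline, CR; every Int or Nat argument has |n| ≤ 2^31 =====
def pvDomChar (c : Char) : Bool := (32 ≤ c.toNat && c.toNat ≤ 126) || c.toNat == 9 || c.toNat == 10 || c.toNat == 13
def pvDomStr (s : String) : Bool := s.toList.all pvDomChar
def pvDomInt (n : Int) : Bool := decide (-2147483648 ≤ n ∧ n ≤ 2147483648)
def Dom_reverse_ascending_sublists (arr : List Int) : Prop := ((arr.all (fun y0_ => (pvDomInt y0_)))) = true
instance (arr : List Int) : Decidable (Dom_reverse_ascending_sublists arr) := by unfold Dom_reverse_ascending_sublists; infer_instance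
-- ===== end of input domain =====

-- ===== PORT A =====
-- B changes only the algorithm; both Pythons mutate arr in place identically, the
-- equivalence proved here is about the return value. In-range Python indexing is
-- ported with List.getD/List.set (all indices A uses are in range).
def swapIdx (arr : List Int) (s e : Nat) : List Int :=
  (arr.set s (arr.getD e 0)).set e (arr.getD s 0)

-- reverse_arr: while start < end swap arr[start], arr[end]
def reverseArrGo (arr : List Int) (s e : Nat) : List Int :=
  if _h : s < e then reverseArrGo (swapIdx arr s e) (s + 1) (e - 1) else arr
termination_by e - s
decreasing_by omega

def stepA (p : List Int × Nat) (i : Nat) : List Int × Nat :=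
  if p.1.getD i 0 < p.1.getD (i - 1) 0 then (reverseArrGo p.1 p.2 (i - 1), i) else p

def reverse_ascending_sublists (arr : List Int) : List Int :=
  let n := arr.length
  if n = 0 then []
  else
    let st := (List.range' 1 (n - 1)).foldl stepA (arr, 0)
    reverseArrGo st.1 st.2 (n - 1)

-- ===== PORT B =====
-- loop of Source B: buffer the current run, flush it reversed on a descent
def altGo : List Int → List Int → List Int → List Int
  | [], run, out => out ++ run.reverse
  | x :: xs, run, out =>
    if x < (PySem.List.pyGet? run (-1)).getD 0 then altGo xs [x] (out ++ run.reverse)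
    else altGo xs (run ++ [x]) out

def reverse_ascending_sublists_alt (arr : List Int) : List Int :=
  match arr with
  | [] => []
  | a :: rest => altGo rest [a] []

-- ===== PRECONDITION & SPEC =====
def Spec_reverse_ascending_sublists (arr : List Int) (out : List Int) : Prop := out = reverse_ascending_sublists_alt arr
instance (arr : List Int) (out : List Int) : Decidable (Spec_reverse_ascending_sublists arr out) := by unfold Spec_reverse_ascending_sublists; infer_instance

-- ===== CLAIM (what is proved, stated in full; the proofs are below) =====
def Claim_equal_reverse_ascending_sublists : Prop := ∀ (arr : List Int), Dom_reverse_ascending_sublists arr → Spec_reverse_ascending_sublists arr (reverse_ascending_sublists arr)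

-- ===== LEMMAS AND PROOFS =====

-- common reference: racc is the current run reversed; result = processed output
def specGo : List Int → List Int → List Int
  | racc, [] => racc
  | racc, x :: xs => if x < racc.headD 0 then racc ++ specGo [x] xs else specGo (x :: racc) xs

lemma specGo_cons (racc : List Int) (x : Int) (xs : List Int) :
    specGo racc (x :: xs) = if x < racc.headD 0 then racc ++ specGo [x] xs else specGo (x :: racc) xs := rfl

lemma getD_at (p : List Int) (a : Int) (r : List Int) : (p ++ a :: r).getD p.length 0 = a := by
  induction p with
  | nil => rfl
  | cons h t ih => simpa using ih

lemma set_at (p : List Int) (a b : Int) (r : List Int) : (p ++ a :: r).set p.length b = p ++ b :: r := by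
  induction p with
  | nil => rfl
  | cons h t ih => simpa using ih

lemma swap_lemma (pre mid suf : List Int) (x z : Int) :
    swapIdx (pre ++ x :: (mid ++ z :: suf)) pre.length (pre.length + mid.length + 1) =
      pre ++ z :: (mid ++ x :: suf) := by
  have gE : (pre ++ x :: (mid ++ z :: suf)).getD (pre.length + mid.length + 1) 0 = z := by
    have hsh : pre ++ x :: (mid ++ z :: suf) = (pre ++ x :: mid) ++ z :: suf := by simp
    have hl : pre.length + mid.length + 1 = (pre ++ x :: mid).length := by simp; omega
    rw [hsh, hl, getD_at]
  have gS : (pre ++ x :: (mid ++ z :: suf)).getD pre.length 0 = x := getD_at pre x (mid ++ z :: suf)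
  unfold swapIdx
  rw [gE, gS, set_at pre x z (mid ++ z :: suf)]
  have hsh2 : pre ++ z :: (mid ++ z :: suf) = (pre ++ z :: mid) ++ z :: suf := by simp
  have hl2 : pre.length + mid.length + 1 = (pre ++ z :: mid).length := by simp; omega
  rw [hsh2, hl2, set_at (pre ++ z :: mid) z x suf]
  simp

lemma segRev (n : Nat) : ∀ (seg pre suf : List Int), seg.length = n →
    reverseArrGo (pre ++ seg ++ suf) pre.length (pre.length + seg.length - 1) =
      pre ++ seg.reverse ++ suf := by
  induction n using Nat.strong_induction_on with
  | _ n ih =>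
    intro seg pre suf hlen
    match seg with
    | [] =>
      rw [reverseArrGo, dif_neg (by simp)]
      simp
    | [x] =>
      rw [reverseArrGo, dif_neg (by simp)]
      simp
    | x :: y :: t =>
      rcases List.eq_nil_or_concat (y :: t : List Int) with h0 | ⟨mid, z, hmz⟩
      · exact absurd h0 (by simp)
      rw [List.concat_eq_append] at hmz
      have hseg2 : (x :: y :: t : List Int) = x :: (mid ++ [z]) := by rw [hmz]
      rw [hseg2]
      have hlen2 : (x :: (mid ++ [z])).length = mid.length + 2 := by simp
      have hlt : pre.length < pre.length + (x :: (mid ++ [z])).length - 1 := by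
        rw [hlen2]; omega
      rw [reverseArrGo, dif_pos hlt]
      have hshape : pre ++ (x :: (mid ++ [z])) ++ suf = pre ++ x :: (mid ++ z :: suf) := by simp
      have hidx : pre.length + (x :: (mid ++ [z])).length - 1 = pre.length + mid.length + 1 := by
        rw [hlen2]; omega
      rw [hshape, hidx, swap_lemma]
      have hshape2 : pre ++ z :: (mid ++ x :: suf) = (pre ++ [z]) ++ mid ++ (x :: suf) := by simp
      have hs1 : pre.length + 1 = (pre ++ [z]).length := by simp
      have he1 : pre.length + mid.length + 1 - 1 = (pre ++ [z]).length + mid.length - 1 := by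
        simp
      rw [hshape2, hs1, he1]
      rw [ih mid.length (by rw [← hlen, hseg2]; simp) mid (pre ++ [z]) (x :: suf) rfl]
      simp

lemma mainA : ∀ (rest out racc : List Int), racc ≠ [] →
    reverseArrGo
      (((List.range' (out.length + racc.length) rest.length).foldl stepA
        (out ++ racc.reverse ++ rest, out.length)).1)
      (((List.range' (out.length + racc.length) rest.length).foldl stepA
        (out ++ racc.reverse ++ rest, out.length)).2)
      (out.length + racc.length + rest.length - 1)
    = out ++ specGo racc rest := by
  intro rest
  induction rest with
  | nil =>
    intro out racc hne
    simp only [List.length_nil, List.range'_zero, List.foldl_nil, Nat.add_zero]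
    have := segRev racc.reverse.length racc.reverse out [] rfl
    simp only [List.append_nil] at this ⊢
    rw [show out.length + racc.length = out.length + racc.reverse.length by simp] at *
    rw [this]
    simp [specGo]
  | cons x xs ihx =>
    intro out racc hne
    rcases racc with _ | ⟨h, t⟩
    · exact absurd rfl hne
    have hlc : (x :: xs).length = xs.length + 1 := rfl
    rw [hlc, List.range'_succ, List.foldl_cons]
    have hgx : (out ++ (h :: t).reverse ++ x :: xs).getD (out.length + (h :: t).length) 0 = x := by
      have e1 : out ++ (h :: t).reverse ++ x :: xs = (out ++ (h :: t).reverse) ++ x :: xs := by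
        simp
      have e2 : out.length + (h :: t).length = (out ++ (h :: t).reverse).length := by
        simp
      rw [e1, e2, getD_at]
    have hgh : (out ++ (h :: t).reverse ++ x :: xs).getD (out.length + (h :: t).length - 1) 0 = h := by
      have e1 : out ++ (h :: t).reverse ++ x :: xs = (out ++ t.reverse) ++ h :: (x :: xs) := by
        simp
      have e2 : out.length + (h :: t).length - 1 = (out ++ t.reverse).length := by
        simp
      rw [e1, e2, getD_at]
    by_cases hlt : x < h
    · have hstep : stepA (out ++ (h :: t).reverse ++ x :: xs, out.length) (out.length + (h :: t).length) =
          ((out ++ h :: t) ++ [x].reverse ++ xs, (out ++ h :: t).length) := by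
        simp only [stepA, hgx, hgh]
        rw [if_pos hlt]
        have hseg := segRev (h :: t).reverse.length (h :: t).reverse out (x :: xs) rfl
        have e3 : out.length + (h :: t).length - 1 = out.length + (h :: t).reverse.length - 1 := by
          simp
        rw [e3, hseg]
        simp
      rw [hstep]
      have e5 : out.length + (h :: t).length + 1 = (out ++ h :: t).length + [x].length := by
        simp <;> omega
      have e6 : out.length + (h :: t).length + (xs.length + 1) - 1 =
          (out ++ h :: t).length + [x].length + xs.length - 1 := by
        simp <;> omega
      rw [e5, e6, ihx (out ++ h :: t) [x] (by simp)]
      have hspec : specGo (h :: t) (x :: xs) = (h :: t) ++ specGo [x] xs := by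
        rw [specGo_cons, if_pos (by simpa using hlt)]
      rw [hspec]; simp
    · have hstep : stepA (out ++ (h :: t).reverse ++ x :: xs, out.length) (out.length + (h :: t).length) =
          (out ++ (x :: h :: t).reverse ++ xs, out.length) := by
        simp only [stepA, hgx, hgh]
        rw [if_neg hlt]
        simp
      rw [hstep]
      have e5 : out.length + (h :: t).length + 1 = out.length + (x :: h :: t).length := by
        simp <;> omega
      have e6 : out.length + (h :: t).length + (xs.length + 1) - 1 =
          out.length + (x :: h :: t).length + xs.length - 1 := by
        simp <;> omega
      rw [e5, e6, ihx out (x :: h :: t) (by simp)]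
      have hspec : specGo (h :: t) (x :: xs) = specGo (x :: h :: t) xs := by
        rw [specGo_cons, if_neg (by simpa using hlt)]
      rw [hspec]

lemma altGo_spec : ∀ (xs run out : List Int), run ≠ [] →
    altGo xs run out = out ++ specGo run.reverse xs := by
  intro xs
  induction xs with
  | nil => intro run out hne; simp [altGo, specGo]
  | cons x t ih =>
    intro run out hne
    have hlast : (PySem.List.pyGet? run (-1)).getD 0 = run.reverse.headD 0 := by
      rw [PySem.List.pyGet?_neg_one]
      rcases run.eq_nil_or_concat with h | ⟨p, z, hp⟩
      · exact absurd h hne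
      · subst hp; simp
    unfold altGo specGo
    rw [hlast]
    by_cases hlt : x < run.reverse.headD 0
    · rw [if_pos hlt, if_pos hlt, ih [x] (out ++ run.reverse) (by simp)]
      simp
    · rw [if_neg hlt, if_neg hlt, ih (run ++ [x]) out (by simp)]
      simp

-- ===== VERDICT (by name: the statement is the Claim_ definition above) =====
theorem reverse_ascending_sublists_spec : Claim_equal_reverse_ascending_sublists := by
  intro arr _hdom
  unfold Spec_reverse_ascending_sublists
  rcases arr with _ | ⟨a, rest⟩
  · rfl
  · unfold reverse_ascending_sublists reverse_ascending_sublists_alt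
    simp only [List.length_cons, Nat.add_sub_cancel]
    rw [if_neg (by omega)]
    have := mainA rest [] [a] (by simp)
    simp only [List.length_nil, List.length_cons, List.reverse_cons, List.reverse_nil,
      List.nil_append, List.append_nil, Nat.zero_add] at this
    rw [altGo_spec rest [a] [] (by simp)]
    simpa using this
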